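-- pv_equiv track=rewrite | github.com/AlgoLeadMe/AlgoLeadMe-1 | pknujsp/문자열/20-옹알이(2).py | solution
-- ===== SOURCE A (Python) =====
-- def solution(babbling):
--     pronunciations = ("aya", "ye", "woo", "ma")
--     count = 0
--
--     for text in babbling:
--         last_sub_text = ""
--         is_vaild = False
--
--         while len(text) > 0:
--             is_vaild = False
--             for available_pron in pronunciations:
--                 if text.startswith(available_pron):
--                     if last_sub_text == available_pron:
--                         is_vaild = False
--                     else:
--                         last_sub_text = available_pron
--                         text = text[len(available_pron) :]
--                         is_vaild = True
--
--                     break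
--
--             if not is_vaild:
--                 break
--
--         if is_vaild:
--             count += 1
--
--     return count
-- ===== SOURCE B (Python) =====
-- # B: char-dispatch tokenizer (first letters of the pronunciations are distinct),
-- # producing the full token list, then a zip-based adjacency check; no last-token
-- # state inside the scanning loop.
--
-- _DISPATCH = {'a': 'aya', 'y': 'ye', 'w': 'woo', 'm': 'ma'}
--
--
-- def _tokenize(word):
--     """Token list of word, or None if word is not a concatenation of tokens."""
--     tokens, i = [], 0
--     while i < len(word):
--         t = _DISPATCH.get(word[i], '')
--         if t and word.startswith(t, i):
--             tokens.append(t)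
--             i += len(t)
--         else:
--             return None
--     return tokens
--
--
-- def solution(babbling):
--     count = 0
--     for word in babbling:
--         tokens = _tokenize(word)
--         if tokens is not None and tokens and all(x != y for x, y in zip(tokens, tokens[1:])):
--             count += 1
--     return count
-- ===== Notes on version B (the rewrite author's own statement) =====
-- stated objective: alternative
-- what changed: Replaces A's greedy strip-with-last-token-state while loop (ordered prefix tests on each step, early break on a repeat) by a char-dispatch tokenizer that builds the whole token list first and then validates it with a separate zip-adjacency pass; the single dict dispatch on the first character replaces A's ordered startswith scan over all four pronunciations per step.
import Mathlib
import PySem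

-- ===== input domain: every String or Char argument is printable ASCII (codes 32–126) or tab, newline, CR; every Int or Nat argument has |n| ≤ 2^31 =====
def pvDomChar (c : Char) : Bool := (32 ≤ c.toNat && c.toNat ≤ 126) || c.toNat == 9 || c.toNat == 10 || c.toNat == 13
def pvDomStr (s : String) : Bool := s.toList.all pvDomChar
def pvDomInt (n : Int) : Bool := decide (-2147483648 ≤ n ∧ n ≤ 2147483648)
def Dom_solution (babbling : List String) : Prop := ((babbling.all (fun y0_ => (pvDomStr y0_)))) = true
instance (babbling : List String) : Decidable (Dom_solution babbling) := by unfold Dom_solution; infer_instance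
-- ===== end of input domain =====

-- B rebuilds the same count by tokenizing each word via first-character dispatch and
-- validating the token list afterwards; equivalence is total (no Pre_).

-- ===== PORT A =====
-- A's inner `for available_pron in pronunciations: if text.startswith(...)` with break:
def findPron (text : List Char) : Option (List Char) :=
  if List.isPrefixOf ['a','y','a'] text then some ['a','y','a']
  else if List.isPrefixOf ['y','e'] text then some ['y','e']
  else if List.isPrefixOf ['w','o','o'] text then some ['w','o','o']
  else if List.isPrefixOf ['m','a'] text then some ['m','a']
  else none

theorem findPron_len {text p : List Char} (h : findPron text = some p) :
    1 ≤ p.length ∧ p.length ≤ text.length := by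
  unfold findPron at h
  split_ifs at h with h1 h2 h3 h4 <;> cases h <;>
    refine ⟨by decide, List.IsPrefix.length_le ?_⟩ <;>
    exact List.isPrefixOf_iff_prefix.mp (by assumption)

-- A's `while len(text) > 0` loop: state = (text, last_sub_text, is_vaild)
def aWhile (text last : List Char) (isValid : Bool) : Bool :=
  if _hne : text.length = 0 then isValid
  else
    match h : findPron text with
    | none => false
    | some p => if last = p then false else aWhile (text.drop p.length) p true
termination_by text.length
decreasing_by
  have := findPron_len h
  simp only [List.length_drop]
  omega

def solution (babbling : List String) : Int :=
  babbling.foldl (fun count text => if aWhile text.toList [] false then count + 1 else count) 0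

-- ===== PORT B =====
-- _DISPATCH.get(word[i], '')
def tokDispatch (c : Char) : List Char :=
  if c = 'a' then ['a','y','a']
  else if c = 'y' then ['y','e']
  else if c = 'w' then ['w','o','o']
  else if c = 'm' then ['m','a']
  else []

-- _tokenize: while i < len(word), dispatch on word[i], check startswith, collect tokens
def tokenize (word : List Char) : Option (List (List Char)) :=
  if _hne : word.length = 0 then some []
  else
    let t := tokDispatch word.headI
    if ht : t ≠ [] ∧ List.isPrefixOf t word then
      match tokenize (word.drop t.length) with
      | none => none
      | some ts => some (t :: ts)
    else none
termination_by word.length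
decreasing_by
  have h1 : (tokDispatch word.headI).length ≠ 0 := by
    simpa [List.length_eq_zero_iff] using ht.1
  simp only [List.length_drop]
  omega

-- all(x != y for x, y in zip(tokens, tokens[1:]))
def noAdjDup (tokens : List (List Char)) : Bool :=
  (tokens.zip (tokens.drop 1)).all (fun p => p.1 != p.2)

def solution_alt (babbling : List String) : Int :=
  babbling.foldl
    (fun count word =>
      match tokenize word.toList with
      | none => count
      | some tokens => if (!tokens.isEmpty) && noAdjDup tokens then count + 1 else count)
    0

-- ===== PRECONDITION & SPEC =====
def Spec_solution (babbling : List String) (out : Int) : Prop := out = solution_alt babbling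
instance (babbling : List String) (out : Int) : Decidable (Spec_solution babbling out) := by unfold Spec_solution; infer_instance

-- ===== CLAIM (what is proved, stated in full; the proofs are below) =====
def Claim_equal_solution : Prop := ∀ (babbling : List String), Dom_solution babbling → Spec_solution babbling (solution babbling)

-- ===== LEMMAS AND PROOFS =====

theorem tok_eq_findPron (word : List Char) (hw : word ≠ []) :
    (if (tokDispatch word.headI) ≠ [] ∧ List.isPrefixOf (tokDispatch word.headI) word
     then some (tokDispatch word.headI) else none) = findPron word := by
  cases word with
  | nil => simp at hw
  | cons c rest =>
    by_cases ha : c = 'a'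
    · subst ha; simp [tokDispatch, findPron, List.isPrefixOf]
    · by_cases hy : c = 'y'
      · subst hy; simp [tokDispatch, findPron, List.isPrefixOf]
      · by_cases hwc : c = 'w'
        · subst hwc; simp [tokDispatch, findPron, List.isPrefixOf]
        · by_cases hm : c = 'm'
          · subst hm; simp [tokDispatch, findPron, List.isPrefixOf]
          · simp [tokDispatch, findPron, List.isPrefixOf, ha, hy, hwc, hm,
              Ne.symm ha, Ne.symm hy, Ne.symm hwc, Ne.symm hm]

theorem noAdjDup_cons (a b : List Char) (r : List (List Char)) :
    noAdjDup (a :: b :: r) = ((a != b) && noAdjDup (b :: r)) := by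
  simp [noAdjDup]

theorem noAdjDup_single (a : List Char) : noAdjDup [a] = true := by simp [noAdjDup]

-- tokenize unfolded via findPron
theorem tokenize_step (word : List Char) (hw : word ≠ []) :
    tokenize word =
      (match findPron word with
       | none => none
       | some p =>
          match tokenize (word.drop p.length) with
          | none => none
          | some ts => some (p :: ts)) := by
  have hl : ¬ word.length = 0 := by simpa [List.length_eq_zero_iff] using hw
  have heq := tok_eq_findPron word hw
  by_cases hc : (tokDispatch word.headI) ≠ [] ∧ List.isPrefixOf (tokDispatch word.headI) word
  · rw [if_pos hc] at heq
    rw [tokenize, dif_neg hl, dif_pos hc, ← heq]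
  · rw [if_neg hc] at heq
    rw [tokenize, dif_neg hl, dif_neg hc, ← heq]

theorem aWhile_step (text last : List Char) (v : Bool) (ht : text ≠ []) :
    aWhile text last v =
      (match findPron text with
       | none => false
       | some p => if last = p then false else aWhile (text.drop p.length) p true) := by
  have hl : ¬ text.length = 0 := by simpa [List.length_eq_zero_iff] using ht
  rw [aWhile, dif_neg hl]
  cases findPron text <;> rfl

theorem aWhile_eq_aux : ∀ (n : Nat) (text : List Char), text.length ≤ n →
    ∀ (last : List Char) (v : Bool),
    aWhile text last v =
      (if text = [] then v else
        match tokenize text with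
        | none => false
        | some ts => noAdjDup (last :: ts)) := by
  intro n
  induction n with
  | zero =>
    intro text hlen last v
    have hte : text = [] := by
      cases text with
      | nil => rfl
      | cons c r => simp at hlen
    subst hte
    rw [aWhile, if_pos rfl]
    rfl
  | succ n ih =>
    intro text hlen last v
    by_cases hte : text = []
    · subst hte
      rw [aWhile, if_pos rfl]
      rfl
    · rw [if_neg hte, aWhile_step text last v hte, tokenize_step text hte]
      cases hfp : findPron text with
      | none => rfl
      | some p =>
        dsimp only
        have hp := findPron_len hfp
        have hdrop : (text.drop p.length).length ≤ n := by
          simp only [List.length_drop]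
          have : text.length ≠ 0 := by simpa [List.length_eq_zero_iff] using hte
          omega
        rw [ih (text.drop p.length) hdrop p true]
        by_cases hlp : last = p
        · subst hlp
          rw [if_pos rfl]
          cases htk : tokenize (text.drop last.length) with
          | none => rfl
          | some ts => simp [noAdjDup_cons]
        · rw [if_neg hlp]
          by_cases hre : text.drop p.length = []
          · rw [if_pos hre, hre]
            have : tokenize ([] : List Char) = some [] := by rw [tokenize]; rfl
            rw [this]
            simp [noAdjDup_cons, noAdjDup_single, hlp]
          · rw [if_neg hre]
            cases htk : tokenize (text.drop p.length) with
            | none => rfl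
            | some ts => simp [noAdjDup_cons, hlp]

theorem tokenize_nil : tokenize ([] : List Char) = some [] := by rw [tokenize]; rfl

theorem word_eq (w : List Char) :
    aWhile w [] false =
      (match tokenize w with
       | none => false
       | some ts => (!ts.isEmpty) && noAdjDup ts) := by
  by_cases hw : w = []
  · subst hw
    rw [aWhile, tokenize_nil]
    rfl
  · rw [aWhile_eq_aux w.length w le_rfl [] false, if_neg hw, tokenize_step w hw]
    cases hfp : findPron w with
    | none => rfl
    | some p =>
      dsimp only
      cases htk : tokenize (w.drop p.length) with
      | none => rfl
      | some ts =>
        dsimp only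
        have hp : p ≠ [] := by
          have := findPron_len hfp
          intro h
          subst h
          simp at this
        have hp' : ([] : List Char) ≠ p := fun h => hp h.symm
        simp [noAdjDup_cons, hp']

theorem foldl_eq (babbling : List String) : ∀ (init : Int),
    babbling.foldl (fun count text => if aWhile text.toList [] false then count + 1 else count) init =
    babbling.foldl
      (fun count word =>
        match tokenize word.toList with
        | none => count
        | some tokens => if (!tokens.isEmpty) && noAdjDup tokens then count + 1 else count)
      init := by
  have hf : (fun (count : Int) (text : String) => if aWhile text.toList [] false then count + 1 else count)
      = (fun (count : Int) (word : String) =>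
          match tokenize word.toList with
          | none => count
          | some tokens => if (!tokens.isEmpty) && noAdjDup tokens then count + 1 else count) := by
    funext count word
    rw [word_eq]
    cases tokenize word.toList with
    | none => rfl
    | some ts => rfl
  intro init
  rw [hf]

theorem solution_eq (babbling : List String) : solution babbling = solution_alt babbling := by
  unfold solution solution_alt
  exact foldl_eq babbling 0

-- ===== VERDICT (by name: the statement is the Claim_ definition above) =====
theorem solution_spec : Claim_equal_solution := by
  intro babbling _
  unfold Spec_solution
  exact solution_eq babbling
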